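-- pv_equiv track=rewrite | github.com/YogiPrasetyaD/backend-ml-pinjemin | main.py | _find_categories
-- ===== SOURCE A (Python) =====
-- CATEGORY_MAP = {
--     1: {
--         "name": "Masak",
--         "keywords": ["masak", "dapur", "telenan", "talenan", "panci", "wajan", "spatula",
--                     "blender", "kompor", "kulkas", "pisau", "sendok", "resep", "makanan", "cooking"]
--     },
--     2: {
--         "name": "Fotografi",
--         "keywords": ["fotografi", "kamera", "camera", "foto", "lensa", "tripod", "flash",
--                     "canon", "nikon", "sony", "portrait", "landscape", "editing", "photography"]
--     },
--     3: {
--         "name": "Membaca",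
--         "keywords": ["membaca", "buku", "novel", "komik", "majalah", "ebook", "reading",
--                     "literature", "fiction", "textbook", "author", "writer", "book"]
--     }
-- }
--
-- def _find_categories(query):
--     """Find relevant categories quickly"""
--     query_words = set(query.lower().split())
--     category_scores = []
--
--     for cat_id, cat_info in CATEGORY_MAP.items():
--         score = len(query_words.intersection(set(cat_info['keywords'])))
--         if score > 0:
--             category_scores.append((cat_id, score))
--
--     category_scores.sort(key=lambda x: x[1], reverse=True)
--     return [cat_id for cat_id, _ in category_scores]
-- ===== SOURCE B (Python) =====
-- CATEGORY_MAP = {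
--     1: {
--         "name": "Masak",
--         "keywords": ["masak", "dapur", "telenan", "talenan", "panci", "wajan", "spatula",
--                     "blender", "kompor", "kulkas", "pisau", "sendok", "resep", "makanan", "cooking"]
--     },
--     2: {
--         "name": "Fotografi",
--         "keywords": ["fotografi", "kamera", "camera", "foto", "lensa", "tripod", "flash",
--                     "canon", "nikon", "sony", "portrait", "landscape", "editing", "photography"]
--     },
--     3: {
--         "name": "Membaca",
--         "keywords": ["membaca", "buku", "novel", "komik", "majalah", "ebook", "reading",
--                     "literature", "fiction", "textbook", "author", "writer", "book"]
--     }
-- }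
--
-- # Inverted index built once: keyword -> category id (keywords are disjoint across categories).
-- _KEYWORD_TO_CAT = {kw: cid for cid, info in CATEGORY_MAP.items() for kw in info["keywords"]}
--
--
-- def _find_categories(query):
--     scores = {}
--     for w in dict.fromkeys(query.lower().split()):
--         cid = _KEYWORD_TO_CAT.get(w)
--         if cid is not None:
--             scores[cid] = scores.get(cid, 0) + 1
--     pairs = [(cid, scores[cid]) for cid in (1, 2, 3) if scores.get(cid, 0) > 0]
--     pairs.sort(key=lambda p: p[1], reverse=True)
--     return [cid for cid, _ in pairs]
-- ===== Notes on version B (the rewrite author's own statement) =====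
-- stated objective: alternative
-- what changed: Replaces the per-category keyword-set intersections with a single inverted index (keyword -> category id) built once, scoring by one dictionary lookup per distinct query word and then emitting category ids 1,2,3 in order with a stable descending sort by score.
import Mathlib
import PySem

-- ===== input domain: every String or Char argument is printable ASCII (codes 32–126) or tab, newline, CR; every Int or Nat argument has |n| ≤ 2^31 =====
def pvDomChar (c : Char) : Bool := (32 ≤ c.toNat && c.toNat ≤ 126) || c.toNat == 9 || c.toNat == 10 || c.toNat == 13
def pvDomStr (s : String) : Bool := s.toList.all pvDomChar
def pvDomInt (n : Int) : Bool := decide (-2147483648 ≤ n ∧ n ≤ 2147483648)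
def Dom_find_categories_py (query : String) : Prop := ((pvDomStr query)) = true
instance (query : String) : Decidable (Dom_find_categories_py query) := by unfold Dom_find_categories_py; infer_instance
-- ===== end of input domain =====

-- B replaces per-category keyword-set intersections with an inverted keyword->category index
-- built once and one lookup per distinct query word (alternative traversal, same results).


-- ===== PORT A =====
def kwMasak : List String := ["masak", "dapur", "telenan", "talenan", "panci", "wajan", "spatula",
  "blender", "kompor", "kulkas", "pisau", "sendok", "resep", "makanan", "cooking"]
def kwFoto : List String := ["fotografi", "kamera", "camera", "foto", "lensa", "tripod", "flash",
  "canon", "nikon", "sony", "portrait", "landscape", "editing", "photography"]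
def kwBaca : List String := ["membaca", "buku", "novel", "komik", "majalah", "ebook", "reading",
  "literature", "fiction", "textbook", "author", "writer", "book"]

-- CATEGORY_MAP.items() as (cat_id, keywords) pairs (the unused "name" field is dropped)
def categoryMap : List (Int × List String) := [(1, kwMasak), (2, kwFoto), (3, kwBaca)]

def find_categories_py (query : String) : List Int :=
  let query_words : PySem.Set String := PySem.Set.ofList (PySem.Str.split₀ (PySem.Str.lower query))
  let category_scores : List (Int × Int) :=
    categoryMap.foldl (fun acc p =>
      let score : Int := PySem.Set.len (PySem.Set.inter query_words (PySem.Set.ofList p.2))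
      if score > 0 then acc ++ [(p.1, score)] else acc) []
  (PySem.List.sorted category_scores (fun x => x.2) true).map (fun x => x.1)

-- ===== PORT B =====
-- _KEYWORD_TO_CAT: inverted index keyword -> category id, built once
def kwIndex : PySem.Dict String Int :=
  PySem.Dict.ofList (kwMasak.map (fun k => (k, (1 : Int)))
    ++ kwFoto.map (fun k => (k, (2 : Int))) ++ kwBaca.map (fun k => (k, (3 : Int))))

def find_categories_py_alt (query : String) : List Int :=
  let words : List String := PySem.List.dedup (PySem.Str.split₀ (PySem.Str.lower query))
  let scores : PySem.Dict Int Int :=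
    words.foldl (fun d w =>
      match kwIndex.get? w with
      | some cid => d.insert cid (d.getD cid 0 + 1)
      | none => d) PySem.Dict.empty
  let pairs : List (Int × Int) :=
    (([1, 2, 3] : List Int).filter (fun cid => scores.getD cid 0 > 0)).map
      (fun cid => (cid, scores.getD cid 0))
  (PySem.List.sorted pairs (fun p => p.2) true).map (fun p => p.1)

-- ===== PRECONDITION & SPEC =====
def Spec_find_categories_py (query : String) (out : List Int) : Prop := out = find_categories_py_alt query
instance (query : String) (out : List Int) : Decidable (Spec_find_categories_py query out) := by unfold Spec_find_categories_py; infer_instance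

-- ===== CLAIM (what is proved, stated in full; the proofs are below) =====
def Claim_equal_find_categories_py : Prop := ∀ (query : String), Dom_find_categories_py query → Spec_find_categories_py query (find_categories_py query)

-- ===== LEMMAS AND PROOFS =====

theorem count_filterMap {α β : Type} [DecidableEq β] (f : α → Option β) (b : β) (l : List α) :
    (l.filterMap f).count b = l.countP (fun a => f a == some b) := by
  induction l with
  | nil => rfl
  | cons x xs ih =>
    simp only [List.filterMap_cons, List.countP_cons]
    cases h : f x with
    | none => simpa [h] using ih
    | some y =>
      by_cases hy : y = b
      · subst hy; simp [ih]
      · simp [hy, ih]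

theorem foldl_step_eq (W : List String) (d : PySem.Dict Int Int) :
    W.foldl (fun d w =>
      match kwIndex.get? w with
      | some cid => d.insert cid (d.getD cid 0 + 1)
      | none => d) d
    = (W.filterMap kwIndex.get?).foldl (fun d x => d.insert x (d.getD x 0 + 1)) d := by
  induction W generalizing d with
  | nil => rfl
  | cons w ws ih =>
    simp only [List.foldl_cons, List.filterMap_cons]
    cases h : kwIndex.get? w with
    | none => simp [ih]
    | some cid => simp [ih]

set_option maxRecDepth 100000 in
theorem kwIndex_eq_mk : kwIndex = PySem.Dict.mk ((kwMasak.map (fun k => (k, (1 : Int))))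
    ++ kwFoto.map (fun k => (k, (2 : Int))) ++ kwBaca.map (fun k => (k, (3 : Int)))) := by rfl

-- the inverted index maps each keyword list's words, and only those, to its category id
set_option maxRecDepth 100000 in
set_option maxHeartbeats 2000000 in
theorem kwIndex_some_iff (w : String) (i : Int) (kws : List String)
    (hik : (i = 1 ∧ kws = kwMasak) ∨ (i = 2 ∧ kws = kwFoto) ∨ (i = 3 ∧ kws = kwBaca)) :
    kwIndex.get? w = some i ↔ w ∈ kws := by
  constructor
  · intro h
    have hm := PySem.Dict.mem_items_of_get?_eq_some kwIndex h
    rw [kwIndex_eq_mk] at hm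
    simp only [kwMasak, kwFoto, kwBaca, List.map, List.cons_append,
      List.nil_append, List.mem_cons, List.not_mem_nil, Prod.mk.injEq, or_false] at hm
    rcases hik with ⟨hi, hk⟩ | ⟨hi, hk⟩ | ⟨hi, hk⟩ <;> subst hi <;> subst hk <;>
      norm_num at hm <;>
      simpa only [kwMasak, kwFoto, kwBaca, List.mem_cons, List.not_mem_nil, or_false] using hm
  · intro h
    rcases hik with ⟨hi, hk⟩ | ⟨hi, hk⟩ | ⟨hi, hk⟩ <;> subst hi <;> subst hk <;>
      fin_cases h <;> rfl

theorem score_eq (W : List String) (kws : List String) (cid : Int)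
    (hmem : ∀ w, kwIndex.get? w = some cid ↔ w ∈ kws) :
    PySem.Set.len (PySem.Set.inter W (PySem.Set.ofList kws))
      = ((W.filterMap kwIndex.get?).count cid : Int) := by
  unfold PySem.Set.len PySem.Set.inter
  rw [count_filterMap]
  congr 1
  rw [← List.countP_eq_length_filter]
  apply List.countP_congr
  intro w _
  simp only [PySem.Set.contains, List.contains_iff_mem, PySem.Set.mem_ofList, beq_iff_eq]
  exact (hmem w).symm

set_option maxHeartbeats 1000000 in
theorem find_categories_py_eq_alt (query : String) :
    find_categories_py query = find_categories_py_alt query := by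
  unfold find_categories_py find_categories_py_alt
  rw [PySem.List.dedup_eq_ofList]
  set W : List String := PySem.Set.ofList (PySem.Str.split₀ (PySem.Str.lower query)) with hW
  simp only [foldl_step_eq, PySem.Dict.getD_foldl_insert_add_one, PySem.Dict.getD_empty]
  have h1 := score_eq W kwMasak 1 (fun w => kwIndex_some_iff w 1 kwMasak (Or.inl ⟨rfl, rfl⟩))
  have h2 := score_eq W kwFoto 2 (fun w => kwIndex_some_iff w 2 kwFoto (Or.inr (Or.inl ⟨rfl, rfl⟩)))
  have h3 := score_eq W kwBaca 3 (fun w => kwIndex_some_iff w 3 kwBaca (Or.inr (Or.inr ⟨rfl, rfl⟩)))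
  simp only [categoryMap, List.foldl_cons, List.foldl_nil, h1, h2, h3, zero_add]
  have key : ∀ f : Int → Int,
      ((if f 3 > 0 then
          (if f 2 > 0 then (if f 1 > 0 then ([] : List (Int × Int)) ++ [(1, f 1)] else []) ++ [(2, f 2)]
           else if f 1 > 0 then [] ++ [(1, f 1)] else []) ++ [(3, f 3)]
        else if f 2 > 0 then (if f 1 > 0 then [] ++ [(1, f 1)] else []) ++ [(2, f 2)]
        else if f 1 > 0 then [] ++ [(1, f 1)] else []) : List (Int × Int))
      = (([1, 2, 3] : List Int).filter (fun cid => decide (f cid > 0))).map (fun cid => (cid, f cid)) := by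
    intro f
    by_cases g1 : f 1 > 0 <;> by_cases g2 : f 2 > 0 <;> by_cases g3 : f 3 > 0 <;>
      simp [List.filter, g1, g2, g3]
  rw [key (fun cid => ((List.count cid (List.filterMap kwIndex.get? W) : Nat) : Int))]

-- ===== VERDICT (by name: the statement is the Claim_ definition above) =====
theorem find_categories_py_spec : Claim_equal_find_categories_py := by
  intro query _
  unfold Spec_find_categories_py
  exact find_categories_py_eq_alt query
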